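-- pv_equiv track=rewrite | github.com/HanJiaxing521/huawei | Cross.py | tailPosition
-- ===== SOURCE A (Python) =====
-- def tailPosition(nexCarPosition, nexRoadLaneNum, nexRoadLength):
--     """return the tails lyst of different lanes of the next road."""
--     tail = []
--
--     for i in range(nexRoadLaneNum):
--         tail.append(nexRoadLength)
--
--     for car in range(len(nexCarPosition)):
--         for lane in range(nexRoadLaneNum):
--             if nexCarPosition[car][2] == lane+1:
--                 if nexCarPosition[car][3] < tail[lane]:
--                     tail[lane] = nexCarPosition[car][3]
--     return tail
-- ===== SOURCE B (Python) =====
-- def tailPosition(nexCarPosition, nexRoadLaneNum, nexRoadLength):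
--     """Single pass: index the minimum tail per lane in a dict, then emit over the lane range."""
--     if nexRoadLaneNum <= 0:
--         return []
--     mins = {}
--     for car in nexCarPosition:
--         lane = car[2]
--         if 1 <= lane <= nexRoadLaneNum and car[3] < mins.get(lane, nexRoadLength):
--             mins[lane] = car[3]
--     return [mins.get(lane, nexRoadLength) for lane in range(1, nexRoadLaneNum + 1)]
-- ===== Notes on version B (the rewrite author's own statement) =====
-- stated objective: faster
-- what changed: Replaces A's per-car rescan of every lane (nested loops) with one pass that indexes the minimum position per lane in a dict, then a separate emit pass over the lane range.
import Mathlib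
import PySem

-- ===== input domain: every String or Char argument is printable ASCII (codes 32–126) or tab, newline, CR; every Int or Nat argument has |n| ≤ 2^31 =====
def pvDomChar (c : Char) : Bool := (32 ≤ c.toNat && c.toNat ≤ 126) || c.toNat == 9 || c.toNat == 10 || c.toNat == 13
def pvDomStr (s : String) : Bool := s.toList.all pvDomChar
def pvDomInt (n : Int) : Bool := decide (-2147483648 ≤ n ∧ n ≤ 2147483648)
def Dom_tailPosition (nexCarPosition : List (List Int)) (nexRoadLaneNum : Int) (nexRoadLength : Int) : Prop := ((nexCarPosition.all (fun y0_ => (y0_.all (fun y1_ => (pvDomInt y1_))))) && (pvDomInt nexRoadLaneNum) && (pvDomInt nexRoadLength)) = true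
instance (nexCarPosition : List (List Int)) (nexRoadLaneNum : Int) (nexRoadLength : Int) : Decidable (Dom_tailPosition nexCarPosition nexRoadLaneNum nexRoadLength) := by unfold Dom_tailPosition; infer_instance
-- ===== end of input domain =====

-- B replaces A's per-car rescan of every lane (nested loops) with one indexing pass that keeps
-- the minimum position per lane in a dict, plus a separate emit pass over the lane range.

-- ===== PORT A =====
def tailPosition (nexCarPosition : List (List Int)) (nexRoadLaneNum : Int) (nexRoadLength : Int) : List Int :=
  let tail : List Int :=
    (PySem.List.pyRange 0 nexRoadLaneNum 1).foldl (fun t _ => t ++ [nexRoadLength]) []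
  (PySem.List.pyRange 0 (PySem.List.len nexCarPosition) 1).foldl (fun t car =>
    (PySem.List.pyRange 0 nexRoadLaneNum 1).foldl (fun t lane =>
      if PySem.List.pyGetD (PySem.List.pyGetD nexCarPosition car []) 2 0 = lane + 1 then
        if PySem.List.pyGetD (PySem.List.pyGetD nexCarPosition car []) 3 0
             < PySem.List.pyGetD t lane 0 then
          PySem.List.pySetD t lane (PySem.List.pyGetD (PySem.List.pyGetD nexCarPosition car []) 3 0)
        else t
      else t) t) tail

-- ===== PORT B =====
def tailPosition_alt (nexCarPosition : List (List Int)) (nexRoadLaneNum : Int) (nexRoadLength : Int) : List Int :=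
  if nexRoadLaneNum ≤ 0 then []
  else
    let mins : PySem.Dict Int Int :=
      nexCarPosition.foldl (fun m car =>
        let lane := PySem.List.pyGetD car 2 0
        if 1 ≤ lane ∧ lane ≤ nexRoadLaneNum ∧
            PySem.List.pyGetD car 3 0 < m.getD lane nexRoadLength then
          m.insert lane (PySem.List.pyGetD car 3 0)
        else m) PySem.Dict.empty
    (PySem.List.pyRange 1 (nexRoadLaneNum + 1) 1).map (fun lane => mins.getD lane nexRoadLength)

-- ===== PRECONDITION & SPEC =====
-- Pre_ excludes exactly the inputs where Python A raises IndexError: with at least one lane,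
-- some car list too short for car[2], or too short for car[3] while its lane is in range.
def Pre_tailPosition (nexCarPosition : List (List Int)) (nexRoadLaneNum : Int) (nexRoadLength : Int) : Prop :=
  nexRoadLaneNum ≤ 0 ∨
    ∀ car ∈ nexCarPosition, 3 ≤ car.length ∧
      (1 ≤ PySem.List.pyGetD car 2 0 ∧ PySem.List.pyGetD car 2 0 ≤ nexRoadLaneNum →
        4 ≤ car.length)
instance (nexCarPosition : List (List Int)) (nexRoadLaneNum : Int) (nexRoadLength : Int) : Decidable (Pre_tailPosition nexCarPosition nexRoadLaneNum nexRoadLength) := by unfold Pre_tailPosition; infer_instance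

def pvWitness_tailPosition : List (List Int) × Int × Int := ([[9, 9, 1, 3], [8, 8, 2, 1], [7, 7, 1, 5]], 2, 10)

def Spec_tailPosition (nexCarPosition : List (List Int)) (nexRoadLaneNum : Int) (nexRoadLength : Int) (out : List Int) : Prop := out = tailPosition_alt nexCarPosition nexRoadLaneNum nexRoadLength
instance (nexCarPosition : List (List Int)) (nexRoadLaneNum : Int) (nexRoadLength : Int) (out : List Int) : Decidable (Spec_tailPosition nexCarPosition nexRoadLaneNum nexRoadLength out) := by unfold Spec_tailPosition; infer_instance

-- ===== CLAIM (what is proved, stated in full; the proofs are below) =====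
def Claim_equal_tailPosition : Prop := ∀ (nexCarPosition : List (List Int)) (nexRoadLaneNum : Int) (nexRoadLength : Int), Dom_tailPosition nexCarPosition nexRoadLaneNum nexRoadLength → Pre_tailPosition nexCarPosition nexRoadLaneNum nexRoadLength → Spec_tailPosition nexCarPosition nexRoadLaneNum nexRoadLength (tailPosition nexCarPosition nexRoadLaneNum nexRoadLength)

-- ===== LEMMAS AND PROOFS =====

-- the per-lane running-minimum step both programs compute
def gstep (lane : Int) (acc : Int) (car : List Int) : Int :=
  if PySem.List.pyGetD car 2 0 = lane ∧ PySem.List.pyGetD car 3 0 < acc then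
    PySem.List.pyGetD car 3 0
  else acc

def gmin (lane : Int) (L : Int) (cars : List (List Int)) : Int := cars.foldl (gstep lane) L

-- B side: the dict entry for an in-range lane is the running minimum over the cars
lemma dict_inv (laneNum L : Int) (cars : List (List Int)) :
    ∀ (m : PySem.Dict Int Int) (lane : Int), 1 ≤ lane → lane ≤ laneNum →
      (cars.foldl (fun m car =>
          let ln := PySem.List.pyGetD car 2 0
          if 1 ≤ ln ∧ ln ≤ laneNum ∧ PySem.List.pyGetD car 3 0 < m.getD ln L then
            m.insert ln (PySem.List.pyGetD car 3 0)
          else m) m).getD lane L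
        = cars.foldl (gstep lane) (m.getD lane L) := by
  induction cars with
  | nil => intro m lane h1 h2; rfl
  | cons c cs ih =>
    intro m lane h1 h2
    simp only [List.foldl_cons]
    rw [ih _ lane h1 h2]
    congr 1
    dsimp only
    by_cases hc : 1 ≤ PySem.List.pyGetD c 2 0 ∧ PySem.List.pyGetD c 2 0 ≤ laneNum ∧
        PySem.List.pyGetD c 3 0 < m.getD (PySem.List.pyGetD c 2 0) L
    · rw [if_pos hc, PySem.Dict.getD_insert]
      unfold gstep
      by_cases he : lane = PySem.List.pyGetD c 2 0
      · rw [if_pos he, if_pos ⟨he.symm, he ▸ hc.2.2⟩]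
      · rw [if_neg he, if_neg (by tauto)]
    · rw [if_neg hc]
      unfold gstep
      by_cases he : PySem.List.pyGetD c 2 0 = lane
      · rw [if_neg]; rintro ⟨h3, h4⟩
        exact hc ⟨he ▸ h1, he ▸ h2, he ▸ h4⟩
      · rw [if_neg (by tauto)]

lemma alt_eq (cars : List (List Int)) (laneNum L : Int) :
    tailPosition_alt cars laneNum L
      = (PySem.List.pyRange 1 (laneNum + 1) 1).map (fun lane => gmin lane L cars) := by
  unfold tailPosition_alt
  split
  · rw [PySem.List.pyRange_one_eq_nil (by omega)]; rfl
  · apply List.map_congr_left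
    intro lane hmem
    rw [PySem.List.mem_pyRange_one] at hmem
    rw [dict_inv laneNum L cars PySem.Dict.empty lane hmem.1 (by omega)]
    rw [PySem.Dict.getD_empty]
    rfl

-- A side: the initial tail loop builds a constant list over the lane range
lemma tail_init (L : Int) :
    ∀ (r : List Int) (init : List Int),
      r.foldl (fun t _ => t ++ [L]) init = init ++ r.map (fun _ => L) := by
  intro r
  induction r with
  | nil => intro init; simp
  | cons x xs ih => intro init; simp [List.foldl, ih]

-- A side: one iteration of the inner lane sweep, elementwise
lemma body_elem (laneNum a : Int) (car t : List Int) (ha : 0 ≤ a) (ha2 : a < laneNum)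
    (hlen : t.length = laneNum.toNat) (k : ℕ) :
    PySem.List.pyGetD (if PySem.List.pyGetD car 2 0 = a + 1 then
        if PySem.List.pyGetD car 3 0 < PySem.List.pyGetD t a 0 then
          PySem.List.pySetD t a (PySem.List.pyGetD car 3 0)
        else t
      else t) (k : Int) 0
    = if (k : Int) = a then gstep (a + 1) (PySem.List.pyGetD t a 0) car
      else PySem.List.pyGetD t (k : Int) 0 := by
  unfold gstep
  by_cases h1 : PySem.List.pyGetD car 2 0 = a + 1
  · by_cases h2 : PySem.List.pyGetD car 3 0 < PySem.List.pyGetD t a 0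
    · rw [if_pos h1, if_pos h2, PySem.List.pySetD_of_nonneg t _ ha]
      by_cases hk : (k : Int) = a
      · have hka : k = a.toNat := by omega
        subst hka
        rw [if_pos hk, if_pos ⟨h1, h2⟩, PySem.List.pyGetD_natCast,
          List.getD_eq_getElem?_getD, List.getElem?_set_self (by omega)]
        rfl
      · rw [if_neg hk, PySem.List.pyGetD_natCast, PySem.List.pyGetD_natCast,
          List.getD_eq_getElem?_getD, List.getD_eq_getElem?_getD,
          List.getElem?_set_ne (by omega)]
    · rw [if_pos h1, if_neg h2]
      by_cases hk : (k : Int) = a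
      · rw [if_pos hk, if_neg (by tauto), hk]
      · rw [if_neg hk]
  · rw [if_neg h1]
    by_cases hk : (k : Int) = a
    · rw [if_pos hk, if_neg (by tauto), hk]
    · rw [if_neg hk]

-- A side: one car's whole inner lane sweep, elementwise
lemma inner_elem (laneNum : Int) (car : List Int) :
    ∀ (n : ℕ) (a : Int) (t : List Int), 0 ≤ a → n = (laneNum - a).toNat →
      t.length = laneNum.toNat →
      ((PySem.List.pyRange a laneNum 1).foldl (fun t lane =>
          if PySem.List.pyGetD car 2 0 = lane + 1 then
            if PySem.List.pyGetD car 3 0 < PySem.List.pyGetD t lane 0 then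
              PySem.List.pySetD t lane (PySem.List.pyGetD car 3 0)
            else t
          else t) t).length = t.length ∧
      ∀ (k : ℕ), k < t.length →
        PySem.List.pyGetD ((PySem.List.pyRange a laneNum 1).foldl (fun t lane =>
          if PySem.List.pyGetD car 2 0 = lane + 1 then
            if PySem.List.pyGetD car 3 0 < PySem.List.pyGetD t lane 0 then
              PySem.List.pySetD t lane (PySem.List.pyGetD car 3 0)
            else t
          else t) t) (k : Int) 0
          = if a ≤ (k : Int) then gstep ((k : Int) + 1) (PySem.List.pyGetD t (k : Int) 0) car
            else PySem.List.pyGetD t (k : Int) 0 := by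
  intro n
  induction n with
  | zero =>
    intro a t ha hn hlen
    rw [PySem.List.pyRange_one_eq_nil (by omega)]
    refine ⟨rfl, fun k hk => ?_⟩
    rw [if_neg (by omega)]; rfl
  | succ n ih =>
    intro a t ha hn hlen
    have ha2 : a < laneNum := by omega
    rw [PySem.List.pyRange_one_cons (by omega), List.foldl_cons]
    have ht1 : (if PySem.List.pyGetD car 2 0 = a + 1 then
        if PySem.List.pyGetD car 3 0 < PySem.List.pyGetD t a 0 then
          PySem.List.pySetD t a (PySem.List.pyGetD car 3 0)
        else t
      else t).length = t.length := by
      split_ifs <;> simp [PySem.List.pySetD_of_nonneg t _ ha]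
    obtain ⟨hL, hE⟩ := ih (a + 1) _ (by omega) (by omega) (by rw [ht1, hlen])
    refine ⟨by rw [hL, ht1], fun k hk => ?_⟩
    rw [hE k (by rw [ht1]; exact hk), body_elem laneNum a car t ha ha2 hlen k]
    rcases lt_trichotomy ((k : Int)) a with h | h | h
    · rw [if_neg (by omega), if_neg (by omega), if_neg (by omega)]
    · rw [if_neg (by omega), if_pos h, if_pos (by omega), h]
    · rw [if_pos (by omega), if_neg (by omega), if_pos (by omega)]

-- A side: the outer fold over the cars, elementwise
lemma outer_elem (laneNum : Int) :
    ∀ (cars : List (List Int)) (t : List Int), t.length = laneNum.toNat →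
      (cars.foldl (fun t car =>
          (PySem.List.pyRange 0 laneNum 1).foldl (fun t lane =>
            if PySem.List.pyGetD car 2 0 = lane + 1 then
              if PySem.List.pyGetD car 3 0 < PySem.List.pyGetD t lane 0 then
                PySem.List.pySetD t lane (PySem.List.pyGetD car 3 0)
              else t
            else t) t) t).length = t.length ∧
      ∀ (k : ℕ), k < t.length →
        PySem.List.pyGetD (cars.foldl (fun t car =>
          (PySem.List.pyRange 0 laneNum 1).foldl (fun t lane =>
            if PySem.List.pyGetD car 2 0 = lane + 1 then
              if PySem.List.pyGetD car 3 0 < PySem.List.pyGetD t lane 0 then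
                PySem.List.pySetD t lane (PySem.List.pyGetD car 3 0)
              else t
            else t) t) t) (k : Int) 0
          = cars.foldl (gstep ((k : Int) + 1)) (PySem.List.pyGetD t (k : Int) 0) := by
  intro cars
  induction cars with
  | nil => intro t hlen; exact ⟨rfl, fun k hk => rfl⟩
  | cons c cs ih =>
    intro t hlen
    simp only [List.foldl_cons]
    obtain ⟨hiL, hiE⟩ := inner_elem laneNum c ((laneNum - 0).toNat) 0 t le_rfl rfl hlen
    obtain ⟨hL, hE⟩ := ih _ (by rw [hiL, hlen])
    refine ⟨by rw [hL, hiL], fun k hk => ?_⟩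
    rw [hE k (by rw [hiL]; exact hk), hiE k hk, if_pos (by omega)]

theorem main_eq (cars : List (List Int)) (laneNum L : Int) :
    tailPosition cars laneNum L = tailPosition_alt cars laneNum L := by
  unfold tailPosition
  rw [PySem.List.foldl_pyRange_zero_pyGetD cars []
    (fun t car =>
      (PySem.List.pyRange 0 laneNum 1).foldl (fun t lane =>
        if PySem.List.pyGetD car 2 0 = lane + 1 then
          if PySem.List.pyGetD car 3 0 < PySem.List.pyGetD t lane 0 then
            PySem.List.pySetD t lane (PySem.List.pyGetD car 3 0)
          else t
        else t) t)]
  rw [tail_init, List.nil_append, alt_eq]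
  have hlen0 : ((PySem.List.pyRange 0 laneNum 1).map (fun _ => L)).length = laneNum.toNat := by
    rw [List.length_map, PySem.List.length_pyRange_one]; omega
  obtain ⟨hL, hE⟩ := outer_elem laneNum cars _ hlen0
  apply List.ext_getElem
  · rw [hL, hlen0, List.length_map, PySem.List.length_pyRange_one]; omega
  · intro i h1 h2
    have hi : (i : Int) < laneNum := by
      have := h1; rw [hL, hlen0] at this; omega
    rw [← List.getD_eq_getElem _ 0 h1, ← List.getD_eq_getElem _ 0 h2,
      ← PySem.List.pyGetD_natCast, ← PySem.List.pyGetD_natCast]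
    rw [hE i (by rw [hlen0]; omega)]
    rw [PySem.List.pyGetD_map_pyRange_of_nonneg _ laneNum _ _ (by omega) (by omega)]
    rw [PySem.List.pyGetD_map_pyRange_one _ 1 (laneNum + 1) i _ (by omega)]
    unfold gmin
    rw [show (1 : Int) + (i : Int) = (i : Int) + 1 by ring]

-- ===== VERDICT (by name: the statement is the Claim_ definition above) =====
theorem tailPosition_spec : Claim_equal_tailPosition := by
  intro cars laneNum L _hDom _hPre
  exact main_eq cars laneNum L
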